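-- pv_equiv track=rewrite | github.com/bluewangk/Canadian_Computing_Competition | 2023/junior/problem_3.py | get_maximum_participants
-- ===== SOURCE A (Python) =====
-- def get_maximum_participants(number, availabilities):
--     maximum_participants = 0
--     maximum_day = ""
--
--     for day in range(5):
--         participants_in_day = 0
--         for availability in availabilities:
--             if availability[day] == "Y":
--                 participants_in_day += 1
--
--         if participants_in_day > maximum_participants:
--             maximum_participants = participants_in_day
--             maximum_day = str(day+1)
--         elif participants_in_day == maximum_participants:
--             if maximum_day == "":
--                 maximum_day = str(day+1)
--             else:
--                 maximum_day += "," + str(day+1)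
--
--     return maximum_day
-- ===== SOURCE B (Python) =====
-- def get_maximum_participants(number, availabilities):
--     counts = [0, 0, 0, 0, 0]
--     for availability in availabilities:
--         for day in range(5):
--             if availability[day] == "Y":
--                 counts[day] += 1
--     best = max(counts)
--     return ",".join(str(day + 1) for day in range(5) if counts[day] == best)
-- ===== Notes on version B (the rewrite author's own statement) =====
-- stated objective: simpler
-- what changed: Replaces A's single interleaved pass (running maximum with conditional string resetting/appending per day) by a transposed count accumulation over the rows followed by max() and a join of the argmax days; the zero-availability case falls out of the join instead of the empty-string special case.
import Mathlib
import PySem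

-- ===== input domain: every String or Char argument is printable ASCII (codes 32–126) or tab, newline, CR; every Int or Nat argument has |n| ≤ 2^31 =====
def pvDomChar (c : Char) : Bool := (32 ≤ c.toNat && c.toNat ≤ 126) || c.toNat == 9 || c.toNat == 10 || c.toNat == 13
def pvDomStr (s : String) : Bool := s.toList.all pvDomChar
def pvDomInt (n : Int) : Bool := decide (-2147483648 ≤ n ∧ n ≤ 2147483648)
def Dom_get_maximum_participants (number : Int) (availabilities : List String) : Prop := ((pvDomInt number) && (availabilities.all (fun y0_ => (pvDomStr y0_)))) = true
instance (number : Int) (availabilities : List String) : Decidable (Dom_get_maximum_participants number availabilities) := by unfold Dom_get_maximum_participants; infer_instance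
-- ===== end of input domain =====

-- B replaces A's single interleaved pass (running maximum with conditional string reset/append
-- per day) by transposed count accumulation over the rows, then max() and a join of the argmax
-- days (objective: simpler decomposition; same cost).

-- ===== PORT A =====
-- the body of A's outer `for day in range(5)` loop, on state (maximum_participants, maximum_day)
def pvStepA (availabilities : List String) (st : Int × String) (day : Int) : Int × String :=
  let participants_in_day : Int := availabilities.foldl
    (fun p availability => if PySem.Str.pyGet? availability day = some 'Y' then p + 1 else p) 0
  if participants_in_day > st.1 then (participants_in_day, PySem.Int.toStr (day + 1))
  else if participants_in_day = st.1 then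
    if st.2 = "" then (st.1, PySem.Int.toStr (day + 1))
    else (st.1, st.2 ++ "," ++ PySem.Int.toStr (day + 1))
  else st

def get_maximum_participants (number : Int) (availabilities : List String) : String :=
  ((PySem.List.pyRange 0 5 1).foldl (pvStepA availabilities) ((0 : Int), "")).2

-- ===== PORT B =====
def get_maximum_participants_alt (number : Int) (availabilities : List String) : String :=
  let counts : List Int := availabilities.foldl
    (fun counts availability =>
      (PySem.List.pyRange 0 5 1).foldl
        (fun counts day =>
          if PySem.Str.pyGet? availability day = some 'Y' then
            PySem.List.pySetD counts day (PySem.List.pyGetD counts day 0 + 1)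
          else counts)
        counts)
    [0, 0, 0, 0, 0]
  let best : Int := ((PySem.List.max? counts (fun x => x)).getD 0)  -- counts is non-empty, so max? is `some`
  PySem.Str.join ","
    (((PySem.List.pyRange 0 5 1).filter (fun day => PySem.List.pyGetD counts day 0 == best)).map
      (fun day => PySem.Int.toStr (day + 1)))

-- ===== PRECONDITION & SPEC =====
-- Pre_ excludes exactly the inputs where some row is shorter than 5 characters:
-- there the Python A raises IndexError at availability[day] (and B raises the same way).
def Pre_get_maximum_participants (number : Int) (availabilities : List String) : Prop :=
  ∀ a ∈ availabilities, 5 ≤ a.toList.length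

instance (number : Int) (availabilities : List String) : Decidable (Pre_get_maximum_participants number availabilities) := by unfold Pre_get_maximum_participants; infer_instance

def pvWitness_get_maximum_participants : Int × List String := (3, ["YYNNY", "NYNYN", "YYNNN"])

def Spec_get_maximum_participants (number : Int) (availabilities : List String) (out : String) : Prop := out = get_maximum_participants_alt number availabilities
instance (number : Int) (availabilities : List String) (out : String) : Decidable (Spec_get_maximum_participants number availabilities out) := by unfold Spec_get_maximum_participants; infer_instance

-- ===== CLAIM (what is proved, stated in full; the proofs are below) =====
def Claim_equal_get_maximum_participants : Prop := ∀ (number : Int) (availabilities : List String), Dom_get_maximum_participants number availabilities → Pre_get_maximum_participants number availabilities → Spec_get_maximum_participants number availabilities (get_maximum_participants number availabilities)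

-- ===== LEMMAS AND PROOFS =====

-- the per-day count of 'Y' rows, as a 0/1 sum
def pvCnt (l : List String) (d : Int) : Int :=
  (l.map (fun a => if PySem.Str.pyGet? a d = some 'Y' then (1 : Int) else 0)).sum

lemma pvCnt_cons (a : String) (l : List String) (d : Int) :
    pvCnt (a :: l) d = (if PySem.Str.pyGet? a d = some 'Y' then (1 : Int) else 0) + pvCnt l d := by
  simp [pvCnt]

lemma pvCnt_nonneg (l : List String) (d : Int) : 0 ≤ pvCnt l d := by
  induction l with
  | nil => simp [pvCnt]
  | cons a t ih => rw [pvCnt_cons]; split_ifs <;> omega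

-- A's inner counting loop computes pvCnt
lemma pvFoldCnt (l : List String) (d : Int) (x : Int) :
    l.foldl (fun p availability => if PySem.Str.pyGet? availability d = some 'Y' then p + 1 else p) x
      = x + pvCnt l d := by
  induction l generalizing x with
  | nil => simp [pvCnt]
  | cons a t ih => rw [List.foldl_cons, pvCnt_cons, ih]; split_ifs <;> omega

-- B's accumulation over one row, on an explicit 5-list
lemma pvRowStep (a : String) (x0 x1 x2 x3 x4 : Int) :
    (PySem.List.pyRange 0 5 1).foldl
      (fun counts day =>
        if PySem.Str.pyGet? a day = some 'Y' then
          PySem.List.pySetD counts day (PySem.List.pyGetD counts day 0 + 1)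
        else counts) [x0, x1, x2, x3, x4]
    = [x0 + (if PySem.Str.pyGet? a 0 = some 'Y' then (1:Int) else 0),
       x1 + (if PySem.Str.pyGet? a 1 = some 'Y' then (1:Int) else 0),
       x2 + (if PySem.Str.pyGet? a 2 = some 'Y' then (1:Int) else 0),
       x3 + (if PySem.Str.pyGet? a 3 = some 'Y' then (1:Int) else 0),
       x4 + (if PySem.Str.pyGet? a 4 = some 'Y' then (1:Int) else 0)] := by
  have hr : PySem.List.pyRange 0 5 1 = [0,1,2,3,4] := by decide
  rw [hr]
  simp only [List.foldl_cons, List.foldl_nil]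
  split_ifs <;> simp [PySem.List.pySetD, PySem.List.pySet?, PySem.List.pyGetD, PySem.List.pyGet?,
    PySem.List.pyIdx?]

-- B's whole accumulation yields the per-day counts
lemma pvCounts (l : List String) (x0 x1 x2 x3 x4 : Int) :
    l.foldl
      (fun counts availability =>
        (PySem.List.pyRange 0 5 1).foldl
          (fun counts day =>
            if PySem.Str.pyGet? availability day = some 'Y' then
              PySem.List.pySetD counts day (PySem.List.pyGetD counts day 0 + 1)
            else counts) counts) [x0, x1, x2, x3, x4]
    = [x0 + pvCnt l 0, x1 + pvCnt l 1, x2 + pvCnt l 2, x3 + pvCnt l 3, x4 + pvCnt l 4] := by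
  induction l generalizing x0 x1 x2 x3 x4 with
  | nil => simp [pvCnt]
  | cons a t ih =>
      rw [List.foldl_cons, pvRowStep, ih]
      simp only [pvCnt_cons]
      ring_nf

-- join over a merged first element
lemma pvJoinSingleton (s : String) : PySem.Str.join "," [s] = s := by
  apply String.ext
  rw [PySem.Str.toList_join]
  simp [PySem.Chars.join_singleton]

lemma pvJoinMerge (s x : String) (l : List String) :
    PySem.Str.join "," ((s ++ "," ++ x) :: l) = PySem.Str.join "," (s :: x :: l) := by
  apply String.ext
  rw [PySem.Str.toList_join, PySem.Str.toList_join]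
  cases l with
  | nil => simp [PySem.Chars.join_cons_cons, PySem.Chars.join_singleton]
  | cons y t => simp [PySem.Chars.join_cons_cons]

lemma pvLeFoldlMax (ds : List Int) (l : List String) (m : Int) :
    m ≤ ds.foldl (fun m d => max m (pvCnt l d)) m := by
  induction ds generalizing m with
  | nil => simp
  | cons d t ih => exact le_trans (le_max_left m (pvCnt l d)) (ih (max m (pvCnt l d)))

-- str(n) is never the empty string
lemma pvCoreLe (b f : Nat) : ∀ (n : Nat) (l : List Char), l.length ≤ (Nat.toDigitsCore b f n l).length := by
  induction f with
  | zero => intro n l; simp [Nat.toDigitsCore]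
  | succ f ih =>
      intro n l
      simp only [Nat.toDigitsCore]
      split
      · simp
      · exact le_trans (by simp) (ih (n / b) (Nat.digitChar (n % b) :: l))

lemma pvToStr_ne (n : Int) : PySem.Int.toStr n ≠ "" := by
  intro h
  have h2 : PySem.Int.toChars n = [] := by rw [← PySem.Int.toList_toStr, h]; rfl
  rw [PySem.Int.toChars.eq_def] at h2
  split at h2
  · simp at h2
  · have h3 : 1 ≤ (Nat.toDigits 10 n.toNat).length := by
      unfold Nat.toDigits
      simp only [Nat.toDigitsCore]
      split
      · simp
      · exact le_trans (by simp) (pvCoreLe 10 n.toNat (n.toNat / 10) _)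
    rw [h2] at h3; simp at h3

lemma pvAppendNe (s x : String) : s ++ "," ++ x ≠ "" := by
  intro h
  have h2 := congrArg String.length h
  simp [String.length_append] at h2

-- characterisation of A's outer loop from a non-empty accumulated string
lemma pvFoldA (l : List String) (ds : List Int) (m : Int) (s : String) (hs : s ≠ "") :
    ds.foldl (pvStepA l) (m, s)
      = (ds.foldl (fun m d => max m (pvCnt l d)) m,
         if m < ds.foldl (fun m d => max m (pvCnt l d)) m
         then PySem.Str.join ","
           ((ds.filter (fun d => pvCnt l d == ds.foldl (fun m d => max m (pvCnt l d)) m)).map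
             (fun d => PySem.Int.toStr (d + 1)))
         else PySem.Str.join ","
           (s :: (ds.filter (fun d => pvCnt l d == ds.foldl (fun m d => max m (pvCnt l d)) m)).map
             (fun d => PySem.Int.toStr (d + 1)))) := by
  induction ds generalizing m s with
  | nil =>
      simp [pvJoinSingleton]
  | cons d t ih =>
      have hstep0 : ∀ st : Int × String, pvStepA l st d =
          if pvCnt l d > st.1 then (pvCnt l d, PySem.Int.toStr (d + 1))
          else if pvCnt l d = st.1 then
            (if st.2 = "" then (st.1, PySem.Int.toStr (d + 1))
             else (st.1, st.2 ++ "," ++ PySem.Int.toStr (d + 1)))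
          else st := by
        intro st
        simp only [pvStepA, pvFoldCnt, Int.zero_add]
      rcases lt_trichotomy m (pvCnt l d) with hgt | heq | hlt
      · -- pvCnt l d > m : reset the string
        have hmax : max m (pvCnt l d) = pvCnt l d := max_eq_right (le_of_lt hgt)
        have hM : pvCnt l d ≤ t.foldl (fun m d => max m (pvCnt l d)) (pvCnt l d) :=
          pvLeFoldlMax t l _
        rw [List.foldl_cons, hstep0, if_pos hgt, ih _ _ (pvToStr_ne (d + 1))]
        simp only [List.foldl_cons, hmax, List.filter_cons]
        set M := t.foldl (fun m d => max m (pvCnt l d)) (pvCnt l d) with hMdef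
        have hmM : m < M := lt_of_lt_of_le hgt hM
        rw [if_pos hmM]
        by_cases hd : pvCnt l d = M
        · have : ¬ pvCnt l d < M := by omega
          rw [if_neg this]
          simp [hd]
        · have : pvCnt l d < M := by omega
          rw [if_pos this]
          simp [hd]
      · -- pvCnt l d = m : append to the string
        have hmax : max m (pvCnt l d) = m := by omega
        rw [List.foldl_cons, hstep0]
        have h1 : ¬ pvCnt l d > m := by omega
        rw [if_neg h1, if_pos heq.symm, if_neg hs]
        rw [ih _ _ (pvAppendNe s (PySem.Int.toStr (d + 1)))]
        simp only [List.foldl_cons, hmax, List.filter_cons]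
        set M := t.foldl (fun m d => max m (pvCnt l d)) m with hMdef
        have hmM : m ≤ M := pvLeFoldlMax t l m
        by_cases hlt2 : m < M
        · rw [if_pos hlt2, if_pos hlt2]
          have : ¬ pvCnt l d = M := by omega
          simp [this]
        · rw [if_neg hlt2, if_neg hlt2]
          have hMm : M = m := by omega
          have : pvCnt l d = M := by omega
          simp only [this, beq_self_eq_true, if_pos, List.map_cons]
          rw [pvJoinMerge]
      · -- pvCnt l d < m : state unchanged
        have hmax : max m (pvCnt l d) = m := by omega
        rw [List.foldl_cons, hstep0]
        have h1 : ¬ pvCnt l d > m := by omega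
        have h2 : ¬ pvCnt l d = m := by omega
        rw [if_neg h1, if_neg h2, ih _ _ hs]
        simp only [List.foldl_cons, hmax, List.filter_cons]
        set M := t.foldl (fun m d => max m (pvCnt l d)) m with hMdef
        have hmM : m ≤ M := pvLeFoldlMax t l m
        have : ¬ pvCnt l d = M := by omega
        simp [this]

-- first iteration of A's loop: from (0, "") the state becomes (count of day 0, "1")
lemma pvFirstStep (l : List String) :
    pvStepA l ((0 : Int), "") 0 = (pvCnt l 0, PySem.Int.toStr 1) := by
  have h0 := pvCnt_nonneg l 0
  simp only [pvStepA, pvFoldCnt, Int.zero_add]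
  split_ifs with h1 h2
  · norm_num
  · norm_num
    omega
  · exfalso
    omega

-- ===== VERDICT (by name: the statement is the Claim_ definition above) =====
theorem get_maximum_participants_spec : Claim_equal_get_maximum_participants := by
  intro number l _ _
  unfold Spec_get_maximum_participants get_maximum_participants get_maximum_participants_alt
  simp only []
  have hr : PySem.List.pyRange 0 5 1 = [0, 1, 2, 3, 4] := by decide
  rw [hr]
  -- A's loop, characterised
  rw [show ([0,1,2,3,4] : List Int).foldl (pvStepA l) ((0 : Int), "") =
      ([1,2,3,4] : List Int).foldl (pvStepA l) (pvCnt l 0, PySem.Int.toStr 1) by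
    rw [List.foldl_cons, pvFirstStep]]
  rw [pvFoldA l [1,2,3,4] (pvCnt l 0) (PySem.Int.toStr 1) (pvToStr_ne 1)]
  -- B's counts, identified with the per-day counts
  have hc := pvCounts l 0 0 0 0 0
  rw [hr] at hc
  simp only [zero_add] at hc
  rw [hc, PySem.List.max?_id_cons, Option.getD_some]
  set M := ([1,2,3,4] : List Int).foldl (fun m d => max m (pvCnt l d)) (pvCnt l 0) with hM
  have hbest : ([pvCnt l 1, pvCnt l 2, pvCnt l 3, pvCnt l 4] : List Int).foldl max (pvCnt l 0)
      = M := by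
    rw [hM]; simp only [List.foldl_cons, List.foldl_nil]
  rw [hbest]
  -- B's filter condition coincides with the per-day count condition
  have hfq : List.filter
        (fun day => PySem.List.pyGetD [pvCnt l 0, pvCnt l 1, pvCnt l 2, pvCnt l 3, pvCnt l 4] day 0 == M)
        ([0, 1, 2, 3, 4] : List Int)
      = List.filter (fun d => pvCnt l d == M) ([0, 1, 2, 3, 4] : List Int) := by
    refine List.filter_congr ?_
    intro x hx
    fin_cases hx <;> simp [PySem.List.pyGetD_ofNat']
  rw [hfq]
  have hc0M : pvCnt l 0 ≤ M := pvLeFoldlMax [1,2,3,4] l (pvCnt l 0)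
  have hsplit : List.filter (fun d => pvCnt l d == M) ([0, 1, 2, 3, 4] : List Int)
      = if (pvCnt l 0 == M) = true then (0 : Int) :: List.filter (fun d => pvCnt l d == M) [1, 2, 3, 4]
        else List.filter (fun d => pvCnt l d == M) [1, 2, 3, 4] := by
    rw [List.filter_cons]
  rw [hsplit]
  by_cases h0 : pvCnt l 0 = M
  · have hnlt : ¬ pvCnt l 0 < M := by omega
    rw [if_neg hnlt]
    simp only [h0, beq_self_eq_true, if_true, List.map_cons]
    norm_num
  · have hlt : pvCnt l 0 < M := by omega
    rw [if_pos hlt, if_neg (by simp [h0])]
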